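-- pv_equiv track=rewrite | github.com/Dilan1234321/dilly-workspace | projects/dilly/dilly_core/auditor.py | _merge_split_name_lines
-- ===== SOURCE A (Python) =====
-- from typing import List, Optional
--
-- def _merge_split_name_lines(lines: List[str]) -> List[str]:
--     """
--     Merge lines that look like one word split across two (e.g. "BROCKENBRO" + "UGH" -> "BROCKENBROUGH").
--     """
--     if not lines:
--         return []
--     merged = []
--     i = 0
--     while i < len(lines):
--         line = lines[i].strip()
--         if not line:
--             i += 1
--             continue
--         # If this line is a single alpha word and next line is a short single alpha word, might be name split
--         if i + 1 < len(lines):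
--             next_line = lines[i + 1].strip()
--             if (
--                 next_line
--                 and " " not in line
--                 and " " not in next_line
--                 and line.isalpha()
--                 and next_line.isalpha()
--                 and len(line) + len(next_line) <= 15
--             ):
--                 merged.append(line + next_line)
--                 i += 2
--                 continue
--         merged.append(line)
--         i += 1
--     return merged
-- ===== SOURCE B (Python) =====
-- from typing import List
--
-- def _merge_split_name_lines(lines: List[str]) -> List[str]:
--     """
--     Merge lines that look like one word split across two (e.g. "BROCKENBRO" + "UGH" -> "BROCKENBROUGH").
--     Single forward pass holding the last token in `pending` instead of index-jumping.
--     """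
--     if not lines:
--         return []
--     merged = []
--     pending = None
--     for raw in lines:
--         cur = raw.strip()
--         if not cur:
--             if pending is not None:
--                 merged.append(pending)
--                 pending = None
--         elif pending is None:
--             pending = cur
--         elif (
--             " " not in pending
--             and " " not in cur
--             and pending.isalpha()
--             and cur.isalpha()
--             and len(pending) + len(cur) <= 15
--         ):
--             merged.append(pending + cur)
--             pending = None
--         else:
--             merged.append(pending)
--             pending = cur
--     if pending is not None:
--         merged.append(pending)
--     return merged
-- ===== Notes on version B (the rewrite author's own statement) =====
-- stated objective: alternative
-- what changed: Replaced the index-jumping while loop (i += 2 on merge, look-ahead at lines[i+1]) by a single for-loop over the lines holding one `pending` stripped token that is merged, flushed or replaced per line.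
import Mathlib
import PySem

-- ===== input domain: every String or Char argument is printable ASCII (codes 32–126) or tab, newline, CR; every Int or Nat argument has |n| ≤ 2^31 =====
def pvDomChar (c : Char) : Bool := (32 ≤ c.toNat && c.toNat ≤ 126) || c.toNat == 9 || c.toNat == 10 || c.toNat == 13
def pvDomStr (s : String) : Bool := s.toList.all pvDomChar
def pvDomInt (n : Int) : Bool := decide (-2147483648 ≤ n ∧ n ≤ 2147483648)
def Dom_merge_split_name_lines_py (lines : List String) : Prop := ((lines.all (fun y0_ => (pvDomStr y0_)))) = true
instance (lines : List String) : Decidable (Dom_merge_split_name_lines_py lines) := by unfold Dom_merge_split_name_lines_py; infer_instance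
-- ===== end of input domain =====

-- B replaces A's index-jumping while loop by a one-pass fold holding a `pending` token (alternative decomposition, same cost).

-- ===== PORT A =====
-- A's while loop advances i by 1 or 2; that is structural recursion on the remaining suffix of `lines`.
def mslA_loop : List String → List String
  | [] => []
  | [l] =>
    let line := PySem.Str.strip l
    if line = "" then [] else [line]
  | l :: next :: rest2 =>
    let line := PySem.Str.strip l
    if line = "" then mslA_loop (next :: rest2)
    else
      let next_line := PySem.Str.strip next
      if next_line ≠ "" ∧
         PySem.Str.isIn " " line = false ∧
         PySem.Str.isIn " " next_line = false ∧
         PySem.Str.strIsalpha line = true ∧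
         PySem.Str.strIsalpha next_line = true ∧
         PySem.Str.len line + PySem.Str.len next_line ≤ 15
      then (line ++ next_line) :: mslA_loop rest2
      else line :: mslA_loop (next :: rest2)

def merge_split_name_lines_py (lines : List String) : List String :=
  if lines = [] then [] else mslA_loop lines

-- ===== PORT B =====
-- B's for-loop with accumulator (merged, pending), ported as a foldl; then the final flush of pending.
def mslB_step (st : List String × Option String) (raw : String) : List String × Option String :=
  let cur := PySem.Str.strip raw
  if cur = "" then
    match st.2 with
    | some p => (st.1 ++ [p], none)
    | none => (st.1, none)
  else
    match st.2 with
    | none => (st.1, some cur)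
    | some p =>
      if PySem.Str.isIn " " p = false ∧
         PySem.Str.isIn " " cur = false ∧
         PySem.Str.strIsalpha p = true ∧
         PySem.Str.strIsalpha cur = true ∧
         PySem.Str.len p + PySem.Str.len cur ≤ 15
      then (st.1 ++ [p ++ cur], none)
      else (st.1 ++ [p], some cur)

def merge_split_name_lines_py_alt (lines : List String) : List String :=
  if lines = [] then []
  else
    let st := lines.foldl mslB_step ([], none)
    match st.2 with
    | some p => st.1 ++ [p]
    | none => st.1

-- ===== PRECONDITION & SPEC =====
def Spec_merge_split_name_lines_py (lines : List String) (out : List String) : Prop := out = merge_split_name_lines_py_alt lines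
instance (lines : List String) (out : List String) : Decidable (Spec_merge_split_name_lines_py lines out) := by unfold Spec_merge_split_name_lines_py; infer_instance

-- ===== CLAIM (what is proved, stated in full; the proofs are below) =====
def Claim_equal_merge_split_name_lines_py : Prop := ∀ (lines : List String), Dom_merge_split_name_lines_py lines → Spec_merge_split_name_lines_py lines (merge_split_name_lines_py lines)

-- ===== LEMMAS AND PROOFS =====

theorem msl_dropWhile_idem {α : Type} (p : α → Bool) (l : List α) :
    List.dropWhile p (List.dropWhile p l) = List.dropWhile p l := by
  induction l with
  | nil => simp
  | cons a as ih =>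
    by_cases h : p a = true
    · simpa [List.dropWhile, h] using ih
    · simp [List.dropWhile, h]

theorem msl_chars_strip_idem (cs : List Char) :
    PySem.Chars.strip (PySem.Chars.strip cs) = PySem.Chars.strip cs := by
  show PySem.Chars.rstrip (PySem.Chars.lstrip (PySem.Chars.rstrip (PySem.Chars.lstrip cs)))
      = PySem.Chars.rstrip (PySem.Chars.lstrip cs)
  have hl : PySem.Chars.lstrip (PySem.Chars.rstrip (PySem.Chars.lstrip cs))
      = PySem.Chars.rstrip (PySem.Chars.lstrip cs) := by
    unfold PySem.Chars.lstrip PySem.Chars.rstrip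
    set t := List.dropWhile PySem.Chars.isspace cs with ht
    have hth : List.dropWhile PySem.Chars.isspace t = t := by
      rw [ht]; exact msl_dropWhile_idem _ cs
    -- the reverse-dropWhile-reverse of t is a prefix of t; its head (if any) fails isspace
    cases hc : t with
    | nil => simp
    | cons a as =>
      have ha : PySem.Chars.isspace a = false := by
        have := hth
        rw [hc] at this
        by_cases hs : PySem.Chars.isspace a = true
        · rw [List.dropWhile] at this
          simp [hs] at this
          have hlen := congrArg List.length this
          have := List.length_dropWhile_le PySem.Chars.isspace as
          simp at hlen
          omega
        · simpa using hs
      have hpre : (List.dropWhile PySem.Chars.isspace (a :: as).reverse).reverse <+: (a :: as) := by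
        have h1 : List.dropWhile PySem.Chars.isspace (a :: as).reverse <:+ (a :: as).reverse :=
          List.dropWhile_suffix _
        rw [← List.reverse_suffix]
        simpa using h1
      cases hd : (List.dropWhile PySem.Chars.isspace (a :: as).reverse).reverse with
      | nil => simp
      | cons b bs =>
        have hb : b = a := by
          rcases hpre with ⟨u, hu⟩
          rw [hd] at hu
          cases hu
          rfl
        subst hb
        simp [List.dropWhile, ha]
  rw [hl]
  unfold PySem.Chars.rstrip
  rw [List.reverse_reverse, msl_dropWhile_idem]

theorem msl_strip_idem (s : String) :
    PySem.Str.strip (PySem.Str.strip s) = PySem.Str.strip s := by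
  apply String.ext
  simp only [PySem.Str.toList_strip]
  exact msl_chars_strip_idem s.toList

-- aLoop only depends on the stripped head
theorem mslA_loop_strip_head (l : String) (rest : List String) :
    mslA_loop (PySem.Str.strip l :: rest) = mslA_loop (l :: rest) := by
  cases rest with
  | nil => simp only [mslA_loop, msl_strip_idem]
  | cons n rs => simp only [mslA_loop, msl_strip_idem]

theorem mslA_skip (l : String) (rest : List String) (hcur : PySem.Str.strip l = "") :
    mslA_loop (l :: rest) = mslA_loop rest := by
  cases rest with
  | nil => simp [mslA_loop, hcur]
  | cons n rs => simp only [mslA_loop, if_pos hcur]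

theorem mslA_pending_step (p l : String) (rest : List String)
    (hps : PySem.Str.strip p = p) (hpne : p ≠ "") :
    mslA_loop (p :: l :: rest) =
      (if PySem.Str.strip l ≠ "" ∧
          PySem.Str.isIn " " p = false ∧
          PySem.Str.isIn " " (PySem.Str.strip l) = false ∧
          PySem.Str.strIsalpha p = true ∧
          PySem.Str.strIsalpha (PySem.Str.strip l) = true ∧
          PySem.Str.len p + PySem.Str.len (PySem.Str.strip l) ≤ 15
       then (p ++ PySem.Str.strip l) :: mslA_loop rest
       else p :: mslA_loop (l :: rest)) := by
  simp only [mslA_loop, hps]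
  rw [if_neg hpne]

-- main invariant for B's fold
theorem msl_fold_inv (ls : List String) : ∀ (out : List String) (pending : Option String),
    (∀ p, pending = some p → PySem.Str.strip p = p ∧ p ≠ "") →
    (match ls.foldl mslB_step (out, pending) with
     | (o, some p) => o ++ [p]
     | (o, none) => o)
      = out ++ (match pending with
                | none => mslA_loop ls
                | some p => mslA_loop (p :: ls)) := by
  induction ls with
  | nil =>
    intro out pending hp
    cases pending with
    | none => simp [mslA_loop]
    | some p =>
      rcases hp p rfl with ⟨hps, hpne⟩
      rw [List.foldl_nil]
      show out ++ [p] = out ++ mslA_loop [p]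
      simp only [mslA_loop, hps]
      rw [if_neg hpne]
  | cons l rest ih =>
    intro out pending hp
    rw [List.foldl_cons]
    by_cases hcur : PySem.Str.strip l = ""
    · -- current line strips empty: flush pending
      cases pending with
      | none =>
        rw [show mslB_step (out, none) l = (out, none) by simp [mslB_step, hcur]]
        rw [ih out none (by intro p hp0; cases hp0)]
        show out ++ mslA_loop rest = out ++ mslA_loop (l :: rest)
        rw [mslA_skip l rest hcur]
      | some p =>
        rcases hp p rfl with ⟨hps, hpne⟩
        rw [show mslB_step (out, some p) l = (out ++ [p], none) by simp [mslB_step, hcur]]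
        rw [ih (out ++ [p]) none (by intro q hq; cases hq)]
        show out ++ [p] ++ mslA_loop rest = out ++ mslA_loop (p :: l :: rest)
        have hnc : ¬ (PySem.Str.strip l ≠ "" ∧
            PySem.Str.isIn " " p = false ∧
            PySem.Str.isIn " " (PySem.Str.strip l) = false ∧
            PySem.Str.strIsalpha p = true ∧
            PySem.Str.strIsalpha (PySem.Str.strip l) = true ∧
            PySem.Str.len p + PySem.Str.len (PySem.Str.strip l) ≤ 15) :=
          fun hcc => hcc.1 hcur
        rw [mslA_pending_step p l rest hps hpne, if_neg hnc, mslA_skip l rest hcur]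
        simp
    · -- current line nonempty
      cases pending with
      | none =>
        rw [show mslB_step (out, none) l = (out, some (PySem.Str.strip l)) by
              simp [mslB_step, hcur]]
        rw [ih out (some (PySem.Str.strip l))
              (by intro q hq; cases hq; exact ⟨msl_strip_idem l, hcur⟩)]
        show out ++ mslA_loop (PySem.Str.strip l :: rest) = out ++ mslA_loop (l :: rest)
        rw [mslA_loop_strip_head]
      | some p =>
        rcases hp p rfl with ⟨hps, hpne⟩
        by_cases hcond : PySem.Str.isIn " " p = false ∧
            PySem.Str.isIn " " (PySem.Str.strip l) = false ∧
            PySem.Str.strIsalpha p = true ∧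
            PySem.Str.strIsalpha (PySem.Str.strip l) = true ∧
            PySem.Str.len p + PySem.Str.len (PySem.Str.strip l) ≤ 15
        · rw [show mslB_step (out, some p) l = (out ++ [p ++ PySem.Str.strip l], none) by
                simp only [mslB_step, if_neg hcur]
                rw [if_pos hcond]]
          rw [ih (out ++ [p ++ PySem.Str.strip l]) none (by intro q hq; cases hq)]
          show out ++ [p ++ PySem.Str.strip l] ++ mslA_loop rest
              = out ++ mslA_loop (p :: l :: rest)
          rw [mslA_pending_step p l rest hps hpne,
              if_pos ⟨hcur, hcond.1, hcond.2.1, hcond.2.2.1, hcond.2.2.2.1, hcond.2.2.2.2⟩]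
          simp
        · rw [show mslB_step (out, some p) l = (out ++ [p], some (PySem.Str.strip l)) by
                simp only [mslB_step, if_neg hcur]
                rw [if_neg hcond]]
          rw [ih (out ++ [p]) (some (PySem.Str.strip l))
              (by intro q hq; cases hq; exact ⟨msl_strip_idem l, hcur⟩)]
          show out ++ [p] ++ mslA_loop (PySem.Str.strip l :: rest)
              = out ++ mslA_loop (p :: l :: rest)
          have hnc : ¬ (PySem.Str.strip l ≠ "" ∧
              PySem.Str.isIn " " p = false ∧
              PySem.Str.isIn " " (PySem.Str.strip l) = false ∧
              PySem.Str.strIsalpha p = true ∧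
              PySem.Str.strIsalpha (PySem.Str.strip l) = true ∧
              PySem.Str.len p + PySem.Str.len (PySem.Str.strip l) ≤ 15) :=
            fun hcc => hcond ⟨hcc.2.1, hcc.2.2.1, hcc.2.2.2.1, hcc.2.2.2.2.1, hcc.2.2.2.2.2⟩
          rw [mslA_pending_step p l rest hps hpne, if_neg hnc, mslA_loop_strip_head]
          simp

theorem merge_split_name_lines_py_spec : Claim_equal_merge_split_name_lines_py := by
  intro lines _
  unfold Spec_merge_split_name_lines_py merge_split_name_lines_py merge_split_name_lines_py_alt
  by_cases h : lines = []
  · simp [h]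
  · simp only [if_neg h]
    have h := msl_fold_inv lines [] none (by intro p hp; cases hp)
    simp only [List.nil_append] at h
    rcases hfe : List.foldl mslB_step ([], none) lines with ⟨o, pd⟩
    rw [hfe] at h
    cases pd <;> simpa using h.symm
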